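-- pv_equiv track=rewrite | github.com/eZanmoto/blog_content | src/code/tricky_strings.py | is_in_strs
-- ===== SOURCE A (Python) =====
-- def is_in_strs(substrs):
--     in_str = False
--     in_strs = [in_str]
--     for substr in substrs:
--         for char in substr:
--             in_strs.append(in_str)
--         in_str = not in_str
--     return in_strs
-- ===== SOURCE B (Python) =====
-- def is_in_strs(substrs):
--     # Difference-array algorithm: mark a toggle event at each block boundary,
--     # then recover the flags by a prefix-XOR scan over character positions.
--     total = 0
--     for s in substrs:
--         total += len(s)
--     marks = [False] * total
--     end = 0
--     for s in substrs:
--         end += len(s)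
--         if end < total:
--             marks[end] = not marks[end]
--     in_strs = [False]
--     cur = False
--     for m in marks:
--         cur = cur != m
--         in_strs.append(cur)
--     return in_strs
-- ===== Notes on version B (the rewrite author's own statement) =====
-- stated objective: alternative
-- what changed: Replaces A's toggle-flag with per-character appends by a difference-array algorithm: one pass records a boolean toggle event at each block boundary in a marks array, and a second pass recovers the flags by a prefix-XOR scan over character positions.
import Mathlib
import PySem

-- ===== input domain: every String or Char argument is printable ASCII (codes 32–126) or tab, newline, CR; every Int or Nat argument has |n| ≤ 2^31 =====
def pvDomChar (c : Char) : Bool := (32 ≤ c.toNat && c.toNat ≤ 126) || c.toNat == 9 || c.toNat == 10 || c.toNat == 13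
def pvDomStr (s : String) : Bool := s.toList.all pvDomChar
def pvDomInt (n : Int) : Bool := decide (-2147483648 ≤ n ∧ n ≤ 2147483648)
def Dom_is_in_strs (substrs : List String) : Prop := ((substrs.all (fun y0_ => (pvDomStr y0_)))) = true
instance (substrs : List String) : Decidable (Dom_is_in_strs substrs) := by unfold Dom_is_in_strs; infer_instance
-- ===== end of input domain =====

-- B replaces A's toggle-flag per-character appends by a difference-array algorithm
-- (toggle events at block boundaries + a prefix-XOR scan); same cost, different algorithm.

-- ===== PORT A =====
def is_in_strs (substrs : List String) : List Bool :=
  (substrs.foldl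
    (fun (acc : List Bool × Bool) substr =>
      (substr.toList.foldl (fun l _ => l ++ [acc.2]) acc.1, !acc.2))
    ([false], false)).1

-- ===== PORT B =====
def is_in_strs_alt (substrs : List String) : List Bool :=
  let total := substrs.foldl (fun a s => a + s.toList.length) 0
  let marks := (substrs.foldl
      (fun (p : List Bool × Nat) s =>
        let e := p.2 + s.toList.length
        ((if e < total then p.1.set e (!(p.1.getD e false)) else p.1), e))
      (List.replicate total false, 0)).1
  (marks.foldl
      (fun (p : List Bool × Bool) m =>
        let c := p.2 != m
        (p.1 ++ [c], c))
      ([false], false)).1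

-- ===== PRECONDITION & SPEC =====
def Spec_is_in_strs (substrs : List String) (out : List Bool) : Prop := out = is_in_strs_alt substrs
instance (substrs : List String) (out : List Bool) : Decidable (Spec_is_in_strs substrs out) := by unfold Spec_is_in_strs; infer_instance

-- ===== CLAIM (what is proved, stated in full; the proofs are below) =====
def Claim_equal_is_in_strs : Prop := ∀ (substrs : List String), Dom_is_in_strs substrs → Spec_is_in_strs substrs (is_in_strs substrs)

-- ===== LEMMAS AND PROOFS =====

-- number of block boundaries (partial sums of the lengths) that are ≤ j, relative form
def cntLE : List Nat → Nat → Nat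
  | [], _ => 0
  | a :: t, j => if j < a then 0 else cntLE t (j - a) + 1

-- number of boundaries exactly equal to p, with absolute running offset e
def cntEQ : List Nat → Nat → Nat → Nat
  | [], _, _ => 0
  | a :: t, e, p => (if e + a = p then 1 else 0) + cntEQ t (e + a) p

-- A's block structure: replicate each flag per block, flipping between blocks
def blocks : List Nat → Bool → List Bool
  | [], _ => []
  | a :: t, f => List.replicate a f ++ blocks t (!f)

-- prefix-XOR scan (the list of running xors)
def sx : List Bool → Bool → List Bool
  | [], _ => []
  | b :: t, c => (c != b) :: sx t (c != b)

-- xor of the first (j+1) entries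
def xpre : List Bool → Nat → Bool
  | [], _ => false
  | b :: _, 0 => b
  | b :: t, j + 1 => b != xpre t j

-- the marks-building fold of port B, over the lengths
def foldMarks : List Nat → List Bool → Nat → Nat → List Bool
  | [], m, _, _ => m
  | a :: t, m, e, T =>
      foldMarks t (if e + a < T then m.set (e + a) (!(m.getD (e + a) false)) else m) (e + a) T

theorem parity_add (a b : Nat) :
    decide ((a + b) % 2 = 1) = (decide (a % 2 = 1) != decide (b % 2 = 1)) := by
  rcases Nat.mod_two_eq_zero_or_one a with h | h <;>
    rcases Nat.mod_two_eq_zero_or_one b with h' | h' <;>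
      simp [Nat.add_mod, h, h']

theorem parity_succ (c : Nat) :
    decide ((c + 1) % 2 = 1) = !decide (c % 2 = 1) := by
  rcases Nat.mod_two_eq_zero_or_one c with h | h <;> simp [Nat.add_mod, h]

-- ---- A side ----

theorem foldl_append_replicate (chars : List Char) (b : Bool) :
    ∀ l : List Bool, chars.foldl (fun l _ => l ++ [b]) l = l ++ List.replicate chars.length b := by
  induction chars with
  | nil => simp
  | cons c t ih => intro l; simp [List.foldl, ih (l ++ [b]), List.replicate_succ]

theorem a_fold_blocks (l : List String) :
    ∀ (f : Bool) (acc : List Bool),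
      (l.foldl
        (fun (a : List Bool × Bool) substr =>
          (substr.toList.foldl (fun l _ => l ++ [a.2]) a.1, !a.2))
        (acc, f)).1
      = acc ++ blocks (l.map (fun s => s.toList.length)) f := by
  induction l with
  | nil => intro f acc; simp [blocks]
  | cons x t ih =>
    intro f acc
    simp only [List.foldl_cons, foldl_append_replicate x.toList f acc, List.map_cons, blocks]
    rw [← List.append_assoc]
    exact ih (!f) _

theorem blocks_length (l : List Nat) : ∀ f, (blocks l f).length = l.sum := by
  induction l with
  | nil => intro f; simp [blocks]
  | cons a t ih => intro f; simp [blocks, ih]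

theorem blocks_get (l : List Nat) :
    ∀ (f : Bool) (j : Nat), j < l.sum →
      (blocks l f)[j]? = some (f != decide (cntLE l j % 2 = 1)) := by
  induction l with
  | nil => intro f j h; simp at h
  | cons a t ih =>
    intro f j h
    by_cases hj : j < a
    · rw [blocks, List.getElem?_append_left (by simpa using hj)]
      simp [cntLE, hj]
    · have hle : a ≤ j := Nat.le_of_not_lt hj
      have hlt : j - a < t.sum := by simp [List.sum_cons] at h; omega
      rw [blocks, List.getElem?_append_right (by simpa using hle)]
      rw [List.length_replicate, ih (!f) (j - a) hlt]
      simp [cntLE, hj, parity_succ]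

-- ---- B side ----

theorem total_eq (l : List String) :
    ∀ n, l.foldl (fun a s => a + s.toList.length) n = n + (l.map (fun s => s.toList.length)).sum := by
  induction l with
  | nil => intro n; simp
  | cons x t ih =>
    intro n
    simp only [List.foldl_cons, List.map_cons, List.sum_cons]
    rw [ih]
    omega

theorem b_fold_marks (l : List String) (T : Nat) :
    ∀ (m : List Bool) (e : Nat),
      (l.foldl
        (fun (p : List Bool × Nat) s =>
          ((if p.2 + s.toList.length < T then
              p.1.set (p.2 + s.toList.length) (!(p.1.getD (p.2 + s.toList.length) false))
            else p.1), p.2 + s.toList.length))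
        (m, e)).1
      = foldMarks (l.map (fun s => s.toList.length)) m e T := by
  induction l with
  | nil => intro m e; simp [foldMarks]
  | cons x t ih => intro m e; simp only [List.foldl_cons, List.map_cons, foldMarks]; exact ih _ _

theorem foldMarks_length (l : List Nat) :
    ∀ (m : List Bool) (e T : Nat), (foldMarks l m e T).length = m.length := by
  induction l with
  | nil => intro m e T; simp [foldMarks]
  | cons a t ih =>
    intro m e T
    rw [foldMarks, ih]
    split <;> simp

theorem getD_set (m : List Bool) (q : Nat) (x : Bool) (p : Nat) :
    (m.set q x).getD p false = if q = p ∧ q < m.length then x else m.getD p false := by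
  simp only [List.getD, List.getElem?_set]
  by_cases h : q = p
  · subst h
    by_cases hq : q < m.length <;> simp [hq]
  · simp [h]

theorem cntEQ_small (l : List Nat) : ∀ (e p : Nat), p < e → cntEQ l e p = 0 := by
  induction l with
  | nil => intro e p _; rfl
  | cons a t ih =>
    intro e p h
    rw [cntEQ, ih (e + a) p (by omega)]
    have : ¬ (e + a = p) := by omega
    simp [this]

theorem foldMarks_getD (l : List Nat) :
    ∀ (m : List Bool) (e T : Nat), m.length = T → e + l.sum ≤ T →
      ∀ p, p < T →
        (foldMarks l m e T).getD p false
          = (m.getD p false != decide (cntEQ l e p % 2 = 1)) := by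
  induction l with
  | nil =>
    intro m e T _ _ p _
    simp [foldMarks, cntEQ]
  | cons a t ih =>
    intro m e T hm hsum p hp
    have hsum' : e + a + t.sum ≤ T := by simp [List.sum_cons] at hsum; omega
    rw [foldMarks, cntEQ]
    by_cases hlt : e + a < T
    · rw [if_pos hlt,
        ih (m.set (e + a) (!(m.getD (e + a) false))) (e + a) T (by simp [hm]) hsum' p hp]
      rw [getD_set]
      by_cases hq : e + a = p
      · subst hq
        simp [hm, hlt, parity_add]
      · simp [hq]
    · rw [if_neg hlt]
      have heq : e + a = T := by omega
      have hq : ¬ (e + a = p) := by omega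
      rw [ih m (e + a) T hm hsum' p hp]
      simp [hq]

theorem sx_length (m : List Bool) : ∀ c, (sx m c).length = m.length := by
  induction m with
  | nil => intro c; rfl
  | cons b t ih => intro c; simp [sx, ih]

theorem sx_get (m : List Bool) :
    ∀ (c : Bool) (j : Nat), j < m.length → (sx m c)[j]? = some (c != xpre m j) := by
  induction m with
  | nil => intro c j h; simp at h
  | cons b t ih =>
    intro c j h
    cases j with
    | zero => simp [sx, xpre]
    | succ j =>
      rw [sx, List.getElem?_cons_succ, ih (c != b) j (by simpa using h)]
      rw [xpre]
      cases c <;> cases b <;> simp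

theorem b_scan_fold (m : List Bool) :
    ∀ (acc : List Bool) (c : Bool),
      (m.foldl (fun (p : List Bool × Bool) mm => (p.1 ++ [p.2 != mm], p.2 != mm)) (acc, c)).1
      = acc ++ sx m c := by
  induction m with
  | nil => intro acc c; simp [sx]
  | cons b t ih => intro acc c; simp only [List.foldl_cons, sx, ih, List.append_assoc]; rfl

theorem xpre_parity (m : List Bool) :
    ∀ (g : Nat → Nat),
      (∀ p, p < m.length → m.getD p false = decide (g p % 2 = 1)) →
      ∀ j, j < m.length →
        xpre m j = decide ((∑ p ∈ Finset.range (j + 1), g p) % 2 = 1) := by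
  induction m with
  | nil => intro g _ j h; simp at h
  | cons b t ih =>
    intro g hg j hj
    cases j with
    | zero =>
      have h0 := hg 0 (by simp)
      simpa [xpre] using h0
    | succ j =>
      have hb := hg 0 (by simp)
      have ht : ∀ p, p < t.length → t.getD p false = decide (g (p + 1) % 2 = 1) := by
        intro p hp
        have := hg (p + 1) (by simpa using Nat.succ_lt_succ hp)
        simpa using this
      rw [xpre, ih (fun p => g (p + 1)) ht j (by simpa using hj)]
      have hsum : (∑ p ∈ Finset.range (j + 2), g p)
          = (∑ p ∈ Finset.range (j + 1), g (p + 1)) + g 0 := Finset.sum_range_succ' g (j + 1)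
      rw [hsum, parity_add]
      simp at hb
      rw [hb]
      cases decide (g 0 % 2 = 1) <;> cases decide ((∑ p ∈ Finset.range (j + 1), g (p + 1)) % 2 = 1) <;> rfl

theorem sum_cntEQ (l : List Nat) :
    ∀ (e j : Nat), e ≤ j →
      (∑ p ∈ Finset.range (j + 1), cntEQ l e p) = cntLE l (j - e) := by
  induction l with
  | nil => intro e j _; simp [cntEQ, cntLE]
  | cons a t ih =>
    intro e j he
    have hsplit : (∑ p ∈ Finset.range (j + 1), cntEQ (a :: t) e p)
        = (∑ p ∈ Finset.range (j + 1), if e + a = p then 1 else 0)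
          + (∑ p ∈ Finset.range (j + 1), cntEQ t (e + a) p) := by
      rw [← Finset.sum_add_distrib]; rfl
    rw [hsplit]
    by_cases hle : e + a ≤ j
    · have h1 : (∑ p ∈ Finset.range (j + 1), if e + a = p then 1 else 0) = 1 := by
        rw [Finset.sum_ite_eq]
        simp [Nat.lt_succ_of_le hle]
      rw [h1, ih (e + a) j hle, cntLE]
      have : ¬ (j - e < a) := by omega
      rw [if_neg this]
      have hj2 : j - e - a = j - (e + a) := by omega
      rw [hj2]
      omega
    · have h1 : (∑ p ∈ Finset.range (j + 1), if e + a = p then 1 else 0) = 0 := by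
        apply Finset.sum_eq_zero
        intro p hp
        simp only [Finset.mem_range] at hp
        have : ¬ (e + a = p) := by omega
        simp [this]
      have h2 : (∑ p ∈ Finset.range (j + 1), cntEQ t (e + a) p) = 0 := by
        apply Finset.sum_eq_zero
        intro p hp
        simp only [Finset.mem_range] at hp
        exact cntEQ_small t (e + a) p (by omega)
      rw [h1, h2, cntLE]
      have : j - e < a := by omega
      simp [this]

-- ===== VERDICT (by name: the statement is the Claim_ definition above) =====
theorem is_in_strs_spec : Claim_equal_is_in_strs := by
  intro substrs _
  unfold Spec_is_in_strs is_in_strs is_in_strs_alt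
  set lens := substrs.map (fun s => s.toList.length) with hlens
  have htot : substrs.foldl (fun a s => a + s.toList.length) 0 = lens.sum := by
    simpa using total_eq substrs 0
  simp only [htot]
  set T := lens.sum with hT
  -- A side
  rw [a_fold_blocks substrs false [false], ← hlens]
  -- B side
  rw [b_fold_marks substrs T (List.replicate T false) 0, ← hlens]
  set marks := foldMarks lens (List.replicate T false) 0 T with hmarks
  rw [b_scan_fold marks [false] false]
  have hmlen : marks.length = T := by rw [hmarks, foldMarks_length]; simp
  have hmget : ∀ p, p < T → marks.getD p false = decide (cntEQ lens 0 p % 2 = 1) := by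
    intro p hp
    rw [hmarks, foldMarks_getD lens (List.replicate T false) 0 T (by simp) (by omega) p hp]
    simp [List.getD, hp]
  have hx : ∀ j, j < T → xpre marks j = decide (cntLE lens j % 2 = 1) := by
    intro j hj
    rw [xpre_parity marks (fun p => cntEQ lens 0 p) (fun p hp => hmget p (by omega)) j
      (by omega)]
    rw [sum_cntEQ lens 0 j (by omega)]
    simp
  apply List.ext_getElem?
  intro i
  cases i with
  | zero => simp
  | succ j =>
    simp only [List.cons_append, List.nil_append, List.getElem?_cons_succ]
    by_cases hj : j < T
    · rw [blocks_get lens false j (by omega), sx_get marks false j (by omega), hx j hj]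
    · rw [List.getElem?_eq_none (by rw [blocks_length]; omega),
        List.getElem?_eq_none (by rw [sx_length, hmlen]; omega)]
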